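-- pv_equiv track=rewrite | github.com/liamartinez/dailydays | scripts/generate-photos.py | _quote_js_keys
-- ===== SOURCE A (Python) =====
-- def _quote_js_keys(s):
--     """
--     Add double quotes around unquoted JS object keys.
--     Walks the string character by character to skip string contents.
--     """
--     result = []
--     i = 0
--     n = len(s)
--     in_string = False
--     escape = False
--
--     while i < n:
--         ch = s[i]
--
--         if escape:
--             result.append(ch)
--             escape = False
--             i += 1
--             continue
--
--         if ch == '\\' and in_string:
--             result.append(ch)
--             escape = True
--             i += 1
--             continue
--
--         if ch == '"':
--             in_string = not in_string
--             result.append(ch)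
--             i += 1
--             continue
--
--         if in_string:
--             result.append(ch)
--             i += 1
--             continue
--
--         # Outside of strings: look for unquoted key pattern
--         # An unquoted key is a word char sequence followed by optional whitespace then ':'
--         if ch.isalpha() or ch == '_':
--             # Check if this is an unquoted key
--             j = i
--             while j < n and (s[j].isalnum() or s[j] == '_'):
--                 j += 1
--             # Skip whitespace after the word
--             k = j
--             while k < n and s[k] in ' \t':
--                 k += 1
--             # If followed by ':', this is a key — quote it
--             if k < n and s[k] == ':':
--                 key = s[i:j]
--                 result.append(f'"{key}"')
--                 i = j  # continue from after the key (before the colon)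
--                 continue
--
--         result.append(ch)
--         i += 1
--
--     return ''.join(result)
-- ===== SOURCE B (Python) =====
-- def _quote_key_before_colon(part):
--     """part is the text before a ':' (outside any string literal): scan it from
--     the RIGHT — strip trailing spaces/tabs, take the trailing word-char run,
--     drop its leading non-start chars — and wrap the key, if any, in quotes."""
--     j = len(part)
--     while j > 0 and part[j - 1] in ' \t':
--         j -= 1
--     i = j
--     while i > 0 and (part[i - 1].isalnum() or part[i - 1] == '_'):
--         i -= 1
--     while i < j and not (part[i].isalpha() or part[i] == '_'):
--         i += 1
--     if i < j:
--         return '%s"%s"%s' % (part[:i], part[i:j], part[j:])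
--     return part
--
-- def _fix_segment(seg):
--     """Quote the keys of a string-literal-free segment: split it on ':' and
--     rewrite the trailing key of every piece that precedes a ':'."""
--     parts = seg.split(':')
--     return ':'.join([_quote_key_before_colon(p) for p in parts[:-1]] + parts[-1:])
--
-- def _quote_js_keys(s):
--     """
--     Add double quotes around unquoted JS object keys.
--     Staged: lex the string into outside segments and string literals (escapes
--     consume two characters), then rewrite each outside segment by splitting it
--     on ':' and quoting the trailing key of each pre-colon piece.
--     """
--     out = []
--     pos = 0
--     n = len(s)
--     while pos < n:
--         q = s.find('"', pos)
--         if q == -1: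
--             out.append(_fix_segment(s[pos:]))
--             pos = n
--         else:
--             out.append(_fix_segment(s[pos:q]))
--             j = q + 1
--             while j < n:
--                 if s[j] == '\\':
--                     j += 2
--                 elif s[j] == '"':
--                     j += 1
--                     break
--                 else:
--                     j += 1
--             j = min(j, n)
--             out.append(s[q:j])
--             pos = j
--     return ''.join(out)
-- ===== Notes on version B (the rewrite author's own statement) =====
-- stated objective: faster
-- what changed: B is staged instead of a char-by-char state machine: it lexes the input into string literals and outside segments, splits each outside segment on ':' and rewrites the trailing key of each pre-colon piece by a right-to-left trim, eliminating A's per-character word re-scan.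
import Mathlib
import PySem

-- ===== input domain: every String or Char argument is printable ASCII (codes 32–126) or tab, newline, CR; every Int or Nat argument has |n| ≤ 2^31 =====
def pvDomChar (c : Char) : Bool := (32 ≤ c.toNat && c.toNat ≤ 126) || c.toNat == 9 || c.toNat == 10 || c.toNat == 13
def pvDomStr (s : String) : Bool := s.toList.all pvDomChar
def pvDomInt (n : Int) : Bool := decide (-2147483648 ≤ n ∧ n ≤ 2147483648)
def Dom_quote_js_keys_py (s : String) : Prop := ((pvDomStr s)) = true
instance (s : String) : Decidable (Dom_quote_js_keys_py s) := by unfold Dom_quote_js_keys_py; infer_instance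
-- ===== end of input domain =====

-- B replaces A's char-by-char state machine by a staged rewrite (lex string
-- literals, split outside segments on ':', quote the trailing key of each
-- pre-colon piece right-to-left); return values proved equal; B avoids A's
-- per-character word re-scan.

-- ===== PORT A =====
-- Char classes of A's code; Char.isAlpha/isAlphanum coincide with Python's
-- str.isalpha/str.isalnum on the printable-ASCII domain Dom_quote_js_keys_py.
def pvIsStart (c : Char) : Bool := c.isAlpha || c = '_'
def pvIsW (c : Char) : Bool := c.isAlphanum || c = '_'
def pvWS (c : Char) : Bool := c = ' ' || c = '\t'

-- A's while-loop, step for step, over the remaining characters (i → the suffix cs).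
-- In the key branch the head c is a word char, so A's j-scan s[i:j] is
-- c :: takeWhile pvIsW rest and i = j resumes at dropWhile pvIsW rest.
def pvGoA : List Char → Bool → Bool → List Char
  | [], _, _ => []
  | c :: rest, inStr, escape =>
    if escape then c :: pvGoA rest inStr false
    else if c = '\\' ∧ inStr = true then c :: pvGoA rest inStr true
    else if c = '"' then c :: pvGoA rest (!inStr) escape
    else if inStr then c :: pvGoA rest inStr escape
    else if pvIsStart c then
      let word := c :: rest.takeWhile pvIsW
      let rest2 := rest.dropWhile pvIsW
      let afterWs := rest2.dropWhile pvWS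
      if afterWs.head? = some ':' then
        ('"' :: word ++ ['"']) ++ pvGoA rest2 inStr escape
      else c :: pvGoA rest inStr escape
    else c :: pvGoA rest inStr escape
  termination_by cs _ _ => cs.length
  decreasing_by
    all_goals simp only [List.length_cons]
    all_goals first
      | exact Nat.lt_succ_self _
      | exact Nat.lt_succ_of_le (List.length_dropWhile_le _ _)

def quote_js_keys_py (s : String) : String := String.ofList (pvGoA s.toList false false)

-- ===== PORT B =====
-- _quote_key_before_colon: right-to-left trim, transliterated through reverse
-- (Python's backward index loops j/i become takeWhile/dropWhile on the reverse).
def pvQuoteKey (part : List Char) : List Char :=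
  let rev := part.reverse
  let ws := rev.takeWhile pvWS          -- part[j:] reversed  (j-loop)
  let r1 := rev.dropWhile pvWS
  let run := r1.takeWhile pvIsW         -- trailing word run reversed  (i-loop)
  let r2 := r1.dropWhile pvIsW
  let pre := run.reverse.takeWhile (fun c => !pvIsStart c)   -- forward i-advance
  let key := run.reverse.dropWhile (fun c => !pvIsStart c)
  if key.isEmpty then part
  else r2.reverse ++ pre ++ '"' :: key ++ '"' :: ws.reverse

-- seg.split(':') — hand port of str.split with a one-char separator
def pvSplit : List Char → List (List Char)
  | [] => [[]]
  | c :: rest =>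
    if c = ':' then [] :: pvSplit rest
    else
      match pvSplit rest with
      | [] => [[c]]          -- unreachable: pvSplit never returns []
      | p :: ps => (c :: p) :: ps

-- ':'.join(quoted pieces + last piece)
def pvJoinFix : List (List Char) → List Char
  | [] => []
  | [last] => last
  | p :: ps => pvQuoteKey p ++ ':' :: pvJoinFix ps

-- _fix_segment
def pvFix (seg : List Char) : List Char := pvJoinFix (pvSplit seg)

-- the inner string-literal lexer loop (after the opening quote):
-- returns (the literal's chars incl. closing quote, the remainder)
def pvLit : List Char → List Char × List Char
  | [] => ([], [])
  | c :: rest =>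
    if c = '\\' then
      match rest with
      | [] => ([c], [])
      | d :: r => let (l, rem) := pvLit r; (c :: d :: l, rem)
    else if c = '"' then ([c], rest)
    else let (l, rem) := pvLit rest; (c :: l, rem)

-- defining equations of pvLit (cited by the termination proof of pvLexB)
theorem pvLit_bs_nil : pvLit ['\\'] = (['\\'], []) := by rw [pvLit.eq_def]; simp
theorem pvLit_bs (d : Char) (r : List Char) :
    pvLit ('\\'::d::r) = ('\\'::d::(pvLit r).1, (pvLit r).2) := by
  cases hp : pvLit r with
  | mk l rem => rw [pvLit.eq_def]; simp [hp]
theorem pvLit_q (rest : List Char) : pvLit ('"'::rest) = (['"'], rest) := by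
  rw [pvLit.eq_def]; simp
theorem pvLit_other (c : Char) (rest : List Char) (hb : ¬ c = '\\') (hq : ¬ c = '"') :
    pvLit (c::rest) = (c::(pvLit rest).1, (pvLit rest).2) := by
  cases hp : pvLit rest with
  | mk l rem => rw [pvLit.eq_def]; simp [hb, hq, hp]

theorem pvLit_snd_le : ∀ cs : List Char, (pvLit cs).2.length ≤ cs.length
  | [] => by simp [pvLit]
  | c :: rest => by
    by_cases hb : c = '\\'
    · subst hb
      cases rest with
      | nil => simp [pvLit_bs_nil]
      | cons d r =>
        have h := pvLit_snd_le r
        simp only [pvLit_bs, List.length_cons]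
        omega
    · by_cases hq : c = '"'
      · subst hq; simp [pvLit_q]
      · have h := pvLit_snd_le rest
        simp only [pvLit_other c rest hb hq, List.length_cons]
        omega

-- the outer while-loop: s.find('"', pos) is the takeWhile/dropWhile split at '"'
def pvLexB (cs : List Char) : List Char :=
  let pre := cs.takeWhile (· ≠ '"')
  let rest := cs.dropWhile (· ≠ '"')
  if hrest : rest = [] then pvFix pre
  else
    -- rest.head is the found '"'; rest.tail is scanned by the literal lexer
    pvFix pre ++ '"' :: (pvLit rest.tail).1 ++ pvLexB (pvLit rest.tail).2
  termination_by cs.length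
  decreasing_by
    have h1 : (pvLit rest.tail).2.length ≤ rest.tail.length := pvLit_snd_le rest.tail
    have h2 : rest.length ≤ cs.length := List.length_dropWhile_le _ _
    have h3 : rest.length ≠ 0 := fun h0 => hrest (List.eq_nil_of_length_eq_zero h0)
    have h4 : rest.tail.length = rest.length - 1 := List.length_tail ..
    simp only [rest, pre] at h1 h2 h3 h4 ⊢
    omega

def quote_js_keys_py_alt (s : String) : String := String.ofList (pvLexB s.toList)

-- ===== PRECONDITION & SPEC =====

def Spec_quote_js_keys_py (s : String) (out : String) : Prop := out = quote_js_keys_py_alt s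
instance (s : String) (out : String) : Decidable (Spec_quote_js_keys_py s out) := by unfold Spec_quote_js_keys_py; infer_instance

-- ===== CLAIM (what is proved, stated in full; the proofs are below) =====
def Claim_equal_quote_js_keys_py : Prop := ∀ (s : String), Dom_quote_js_keys_py s → Spec_quote_js_keys_py s (quote_js_keys_py s)

-- ===== LEMMAS AND PROOFS =====

theorem pvLit_nil : pvLit [] = ([], []) := by rw [pvLit.eq_def]

-- char-class facts
theorem pvWS_not_isW {c : Char} (h : pvWS c = true) : pvIsW c = false := by
  simp only [pvWS, Bool.or_eq_true, decide_eq_true_eq] at h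
  rcases h with rfl | rfl <;> decide

theorem pvIsW_not_WS {c : Char} (h : pvIsW c = true) : pvWS c = false := by
  cases hw : pvWS c
  · rfl
  · rw [pvWS_not_isW hw] at h; exact absurd h (by simp)

theorem pvWS_not_start {c : Char} (h : pvWS c = true) : pvIsStart c = false := by
  simp only [pvWS, Bool.or_eq_true, decide_eq_true_eq] at h
  rcases h with rfl | rfl <;> decide

theorem pvIsStart_isW {c : Char} (h : pvIsStart c = true) : pvIsW c = true := by
  simp only [pvIsStart, Bool.or_eq_true] at h
  rcases h with h | h
  · simp [pvIsW, Char.isAlphanum, h]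
  · simp [pvIsW, h]

-- takeWhile/dropWhile over an append, when the second list's head fails p
theorem tw_bd {p : Char → Bool} : ∀ (xs tail : List Char),
    (∀ c, tail.head? = some c → p c = false) →
    (xs ++ tail).takeWhile p = xs.takeWhile p := by
  intro xs tail h
  induction xs with
  | nil =>
    cases tail with
    | nil => rfl
    | cons c t => simp [List.takeWhile_cons, h c rfl]
  | cons x xs ih =>
    simp only [List.cons_append, List.takeWhile_cons]
    cases hx : p x <;> simp [ih]

theorem dw_bd {p : Char → Bool} : ∀ (xs tail : List Char),
    (∀ c, tail.head? = some c → p c = false) →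
    (xs ++ tail).dropWhile p = xs.dropWhile p ++ tail := by
  intro xs tail h
  induction xs with
  | nil =>
    cases tail with
    | nil => rfl
    | cons c t => simp [List.dropWhile_cons, h c rfl]
  | cons x xs ih =>
    simp only [List.cons_append, List.dropWhile_cons]
    cases hx : p x <;> simp [ih]

-- takeWhile/dropWhile over an append when p fails somewhere in the first list
theorem tw_stop {p : Char → Bool} : ∀ (xs ys : List Char),
    (¬ xs.all p = true) → (xs ++ ys).takeWhile p = xs.takeWhile p := by
  intro xs ys h
  induction xs with
  | nil => simp at h
  | cons x xs ih =>
    simp only [List.all_cons, Bool.and_eq_true, not_and] at h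
    simp only [List.cons_append, List.takeWhile_cons]
    cases hx : p x
    · simp
    · simp [ih (h hx)]

theorem dw_stop {p : Char → Bool} : ∀ (xs ys : List Char),
    (¬ xs.all p = true) → (xs ++ ys).dropWhile p = xs.dropWhile p ++ ys := by
  intro xs ys h
  induction xs with
  | nil => simp at h
  | cons x xs ih =>
    simp only [List.all_cons, Bool.and_eq_true, not_and] at h
    simp only [List.cons_append, List.dropWhile_cons]
    cases hx : p x
    · simp
    · simp [ih (h hx)]

-- takeWhile/dropWhile over an append when the whole first list satisfies p
theorem tw_all {p : Char → Bool} : ∀ (xs ys : List Char),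
    xs.all p = true → (xs ++ ys).takeWhile p = xs ++ ys.takeWhile p := by
  intro xs ys h
  induction xs with
  | nil => simp
  | cons x xs ih =>
    simp only [List.all_cons, Bool.and_eq_true] at h
    simp [List.takeWhile_cons, h.1, ih h.2]

theorem dw_all {p : Char → Bool} : ∀ (xs ys : List Char),
    xs.all p = true → (xs ++ ys).dropWhile p = ys.dropWhile p := by
  intro xs ys h
  induction xs with
  | nil => simp
  | cons x xs ih =>
    simp only [List.all_cons, Bool.and_eq_true] at h
    simp [List.dropWhile_cons, h.1, ih h.2]

-- generic takeWhile/dropWhile helpers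
theorem tw_id {p : Char → Bool} (l : List Char) (h : l.all p = true) : l.takeWhile p = l := by
  induction l with
  | nil => rfl
  | cons a t ih => simp only [List.all_cons, Bool.and_eq_true] at h; simp [List.takeWhile_cons, h.1, ih h.2]

theorem dw_id {p : Char → Bool} (l : List Char) (h : l.all p = true) : l.dropWhile p = [] := by
  induction l with
  | nil => rfl
  | cons a t ih => simp only [List.all_cons, Bool.and_eq_true] at h; simp [List.dropWhile_cons, h.1, ih h.2]

theorem tw_none {p : Char → Bool} (l : List Char) (h : ∀ x ∈ l, p x = false) : l.takeWhile p = [] := by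
  cases l with
  | nil => rfl
  | cons a t => simp [List.takeWhile_cons, h a (by simp)]

theorem dw_none {p : Char → Bool} (l : List Char) (h : ∀ x ∈ l, p x = false) : l.dropWhile p = l := by
  cases l with
  | nil => rfl
  | cons a t => simp [List.dropWhile_cons, h a (by simp)]

theorem dw_head {p : Char → Bool} (l : List Char) (c : Char) (h : (l.dropWhile p).head? = some c) : p c = false := by
  induction l with
  | nil => simp at h
  | cons a t ih =>
    rw [List.dropWhile_cons] at h
    by_cases ha : p a = true
    · rw [if_pos ha] at h; exact ih h
    · rw [if_neg ha] at h; simp at h; subst h; simpa using ha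

theorem dw_getLast? {p : Char → Bool} (l : List Char) (h : l.dropWhile p ≠ []) :
    (l.dropWhile p).getLast? = l.getLast? := by
  obtain ⟨t, ht⟩ := List.dropWhile_suffix (l := l) (p := p)
  conv_rhs => rw [← ht]
  rw [List.getLast?_append_of_ne_nil _ h]

-- A's walk over a string-free outside region (proof helper: the outside branch of pvGoA)
def pvOut : List Char → List Char
  | [] => []
  | c :: rest =>
    if pvIsStart c then
      if (((rest.dropWhile pvIsW).dropWhile pvWS)).head? = some ':' then
        ('"' :: (c :: rest.takeWhile pvIsW) ++ ['"']) ++ pvOut (rest.dropWhile pvIsW)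
      else c :: pvOut rest
    else c :: pvOut rest
  termination_by cs => cs.length
  decreasing_by
    all_goals simp only [List.length_cons]
    all_goals first
      | exact Nat.lt_succ_self _
      | exact Nat.lt_succ_of_le (List.length_dropWhile_le _ _)

-- pvSplit facts
theorem pvSplit_ne_nil : ∀ xs : List Char, pvSplit xs ≠ [] := by
  intro xs
  cases xs with
  | nil => simp [pvSplit]
  | cons c rest =>
    rw [pvSplit]
    by_cases h : c = ':'
    · simp [h]
    · simp only [if_neg h]
      cases pvSplit rest <;> simp

theorem pvSplit_no_colon : ∀ xs : List Char, (∀ c ∈ xs, ¬ c = ':') → pvSplit xs = [xs] := by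
  intro xs h
  induction xs with
  | nil => rfl
  | cons c rest ih =>
    rw [pvSplit, if_neg (h c (by simp)), ih (fun d hd => h d (by simp [hd]))]

theorem pvSplit_append : ∀ (xs ys : List Char), (∀ c ∈ xs, ¬ c = ':') →
    ∀ p ps, pvSplit ys = p :: ps → pvSplit (xs ++ ys) = (xs ++ p) :: ps := by
  intro xs
  induction xs with
  | nil => intro ys _ p ps h; simpa using h
  | cons c rest ih =>
    intro ys h p ps hys
    rw [List.cons_append, pvSplit, if_neg (h c (by simp)),
      ih ys (fun d hd => h d (by simp [hd])) p ps hys]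
    rfl

theorem pvJoinFix_cons (a : List Char) (l : List (List Char)) (h : l ≠ []) :
    pvJoinFix (a :: l) = pvQuoteKey a ++ ':' :: pvJoinFix l := by
  cases l with
  | nil => exact absurd rfl h
  | cons b m => rfl

-- pvQuoteKey rewriting lemmas
theorem pvQuoteKey_nil : pvQuoteKey [] = [] := rfl

-- zeta-reduced closed form of pvQuoteKey (definitional)
theorem pvQuoteKey_def (part : List Char) : pvQuoteKey part =
    (if ((((part.reverse.dropWhile pvWS).takeWhile pvIsW).reverse.dropWhile
        (fun c => !pvIsStart c)).isEmpty = true) then part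
     else ((part.reverse.dropWhile pvWS).dropWhile pvIsW).reverse ++
       (((part.reverse.dropWhile pvWS).takeWhile pvIsW).reverse.takeWhile (fun c => !pvIsStart c)) ++
       '"' :: (((part.reverse.dropWhile pvWS).takeWhile pvIsW).reverse.dropWhile (fun c => !pvIsStart c)) ++
       '"' :: (part.reverse.takeWhile pvWS).reverse) := rfl

theorem quoteKey_word (c : Char) (run ws : List Char) (hc : pvIsStart c = true)
    (hrun : run.all pvIsW = true) (hws : ws.all pvWS = true) :
    pvQuoteKey ((c :: run) ++ ws) = '"' :: (c :: run) ++ '"' :: ws := by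
  have hR : (run.reverse ++ [c]).all pvIsW = true := by
    simp only [List.all_append, List.all_reverse, Bool.and_eq_true, List.all_cons, List.all_nil,
      Bool.and_true]
    exact ⟨hrun, pvIsStart_isW hc⟩
  have hRws : ∀ x ∈ run.reverse ++ [c], pvWS x = false := by
    intro x hx
    exact pvIsW_not_WS (by rw [List.all_eq_true] at hR; exact hR x hx)
  have hrev : ((c :: run) ++ ws).reverse = ws.reverse ++ (run.reverse ++ [c]) := by
    simp
  rw [pvQuoteKey_def, hrev, tw_all _ _ (by simpa using hws), tw_none _ hRws,
    dw_all _ _ (by simpa using hws), dw_none _ hRws, tw_id _ hR, dw_id _ hR]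
  have h5 : (run.reverse ++ [c]).reverse = c :: run := by simp
  rw [h5]
  have h6 : (c :: run).dropWhile (fun c => !pvIsStart c) = c :: run := by
    rw [List.dropWhile_cons]; simp [hc]
  have h7 : (c :: run).takeWhile (fun c => !pvIsStart c) = [] := by
    rw [List.takeWhile_cons]; simp [hc]
  rw [h6, h7]
  simp

theorem quoteKey_skip (xs p : List Char) (hne : p ≠ [])
    (hhd : ∀ d, p.head? = some d → pvIsW d = false) (hws : ¬ p.all pvWS = true) :
    pvQuoteKey (xs ++ p) = xs ++ pvQuoteKey p := by
  have hrev : ¬ p.reverse.all pvWS = true := by simpa [List.all_reverse] using hws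
  have hr1ne : p.reverse.dropWhile pvWS ≠ [] := by
    intro h0
    exact hrev (List.all_eq_true.2 (List.dropWhile_eq_nil_iff.1 h0))
  obtain ⟨d, hd⟩ : ∃ d, p.head? = some d := by
    cases p with
    | nil => exact absurd rfl hne
    | cons a t => exact ⟨a, rfl⟩
  have hdmem : d ∈ p.reverse.dropWhile pvWS := by
    apply List.mem_of_getLast?
    rw [dw_getLast? _ hr1ne, List.getLast?_reverse, hd]
  have hnotall : ¬ (p.reverse.dropWhile pvWS).all pvIsW = true := by
    intro hall
    rw [List.all_eq_true] at hall
    have := hall d hdmem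
    rw [hhd d hd] at this
    exact absurd this (by simp)
  rw [pvQuoteKey_def, pvQuoteKey_def, List.reverse_append, tw_stop _ _ hrev, dw_stop _ _ hrev,
    tw_stop _ _ hnotall, dw_stop _ _ hnotall]
  by_cases hk : (((p.reverse.dropWhile pvWS).takeWhile pvIsW).reverse.dropWhile
      (fun c => !pvIsStart c)).isEmpty = true
  · rw [if_pos hk, if_pos hk]
  · rw [if_neg hk, if_neg hk]
    simp

theorem quoteKey_cons_nonstart (c : Char) (p : List Char) (hc : pvIsStart c = false) :
    pvQuoteKey (c :: p) = c :: pvQuoteKey p := by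
  have hrev : (c :: p).reverse = p.reverse ++ [c] := by simp
  by_cases hall : p.all pvWS = true
  · -- the whole of p is spaces/tabs
    have hpr : p.reverse.all pvWS = true := by simpa [List.all_reverse] using hall
    have hkp : pvQuoteKey p = p := by
      rw [pvQuoteKey_def, dw_id _ hpr, List.takeWhile_nil, List.dropWhile_nil]
      simp
    by_cases hcw : pvWS c = true
    · have hallc : (p.reverse ++ [c]).all pvWS = true := by simp [List.all_append, hpr, hcw]
      rw [pvQuoteKey_def, hrev, dw_id _ hallc]
      simp [hkp]
    · have hdc : List.dropWhile pvWS [c] = [c] := by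
        rw [List.dropWhile_cons]; simp [hcw]
      rw [pvQuoteKey_def, hrev, dw_all _ _ hpr, hdc]
      by_cases hcwd : pvIsW c = true
      · have h1 : List.takeWhile pvIsW [c] = [c] := by rw [List.takeWhile_cons]; simp [hcwd]
        rw [h1]
        have h2 : ([c] : List Char).reverse.dropWhile (fun c => !pvIsStart c) = [] := by
          simp [List.dropWhile_cons, hc]
        rw [h2]
        simp [hkp]
      · have h1 : List.takeWhile pvIsW [c] = [] := by rw [List.takeWhile_cons]; simp [hcwd]
        rw [h1]
        simp [hkp]
  · -- p has a non-whitespace char: the whole right-to-left analysis stays inside p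
    have hprev : ¬ p.reverse.all pvWS = true := by simpa [List.all_reverse] using hall
    have hr1ne : p.reverse.dropWhile pvWS ≠ [] := by
      intro h0
      exact hprev (List.all_eq_true.2 (List.dropWhile_eq_nil_iff.1 h0))
    rw [pvQuoteKey_def, pvQuoteKey_def, hrev, tw_stop _ _ hprev, dw_stop _ _ hprev]
    by_cases hr1all : (p.reverse.dropWhile pvWS).all pvIsW = true
    · rw [tw_all _ _ hr1all, dw_all _ _ hr1all, tw_id _ hr1all, dw_id _ hr1all]
      by_cases hcwd : pvIsW c = true
      · rw [List.takeWhile_cons, List.dropWhile_cons]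
        simp only [hcwd, if_pos, List.takeWhile_nil, List.dropWhile_nil, List.append_nil]
        rw [List.reverse_append, show ([c] : List Char).reverse = [c] from rfl,
          List.singleton_append, List.dropWhile_cons, List.takeWhile_cons]
        simp only [hc, Bool.not_false, if_pos]
        by_cases hk : ((p.reverse.dropWhile pvWS).reverse.dropWhile
            (fun c => !pvIsStart c)).isEmpty = true
        · rw [if_pos hk, if_pos hk]
        · rw [if_neg hk, if_neg hk]; simp
      · rw [List.takeWhile_cons, List.dropWhile_cons]
        simp only [hcwd, Bool.false_eq_true, if_false, List.append_nil]
        by_cases hk : ((p.reverse.dropWhile pvWS).reverse.dropWhile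
            (fun c => !pvIsStart c)).isEmpty = true
        · rw [if_pos hk, if_pos hk]
        · rw [if_neg hk, if_neg hk]; simp
    · rw [tw_stop _ _ hr1all, dw_stop _ _ hr1all]
      by_cases hk : (((p.reverse.dropWhile pvWS).takeWhile pvIsW).reverse.dropWhile
          (fun c => !pvIsStart c)).isEmpty = true
      · rw [if_pos hk, if_pos hk]
      · rw [if_neg hk, if_neg hk]; simp

-- pvOut rewriting lemmas
theorem pvOut_nonstart_prefix : ∀ (xs ys : List Char), (∀ c ∈ xs, pvIsStart c = false) →
    pvOut (xs ++ ys) = xs ++ pvOut ys := by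
  intro xs
  induction xs with
  | nil => simp
  | cons c rest ih =>
    intro ys h
    rw [List.cons_append, pvOut, if_neg (by simp [h c (by simp)]),
      ih ys (fun d hd => h d (by simp [hd])), List.cons_append]

-- the key lemma: on a colon-free piece a followed by ':', A's walk quotes exactly
-- the trailing key of a, i.e. computes pvQuoteKey a
theorem pvOut_piece : ∀ (a u : List Char), (∀ c ∈ a, ¬ c = ':') →
    pvOut (a ++ ':' :: u) = pvQuoteKey a ++ ':' :: pvOut u
  | [], u => by
    intro _
    rw [List.nil_append, pvOut]
    simp [pvQuoteKey_nil, show pvIsStart ':' = false from rfl]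
  | c :: a', u => by
    intro h
    have hW : ∀ d, ((':' :: u : List Char)).head? = some d → pvIsW d = false := by
      intro d hd; simp at hd; subst hd; decide
    have htw : (a' ++ ':' :: u).takeWhile pvIsW = a'.takeWhile pvIsW := tw_bd _ _ hW
    have hdw : (a' ++ ':' :: u).dropWhile pvIsW = a'.dropWhile pvIsW ++ ':' :: u := dw_bd _ _ hW
    have hdw2 : ((a'.dropWhile pvIsW) ++ ':' :: u).dropWhile pvWS
        = (a'.dropWhile pvIsW).dropWhile pvWS ++ ':' :: u :=
      dw_bd _ _ (by intro d hd; simp at hd; subst hd; decide)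
    have hsplit : a'.takeWhile pvIsW ++ a'.dropWhile pvIsW = a' := List.takeWhile_append_dropWhile
    rw [List.cons_append, pvOut]
    by_cases hst : pvIsStart c = true
    · rw [if_pos hst, htw, hdw, hdw2]
      by_cases hw2 : (a'.dropWhile pvIsW).dropWhile pvWS = []
      · -- only spaces/tabs between the word and the ':' — A quotes the key
        have ha2 : (a'.dropWhile pvIsW).all pvWS = true :=
          List.all_eq_true.2 (List.dropWhile_eq_nil_iff.1 hw2)
        rw [hw2, List.nil_append, List.head?_cons, if_pos (rfl : some ':' = some ':')]
        rw [pvOut_nonstart_prefix (a'.dropWhile pvIsW) (':' :: u)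
            (fun d hd => pvWS_not_start (List.all_eq_true.1 ha2 d hd))]
        rw [pvOut, if_neg (by decide)]
        conv_rhs => rw [← hsplit]
        rw [show (c :: (a'.takeWhile pvIsW ++ a'.dropWhile pvIsW) : List Char) =
              (c :: a'.takeWhile pvIsW) ++ a'.dropWhile pvIsW from rfl]
        rw [quoteKey_word c _ _ hst
            (List.all_eq_true.2 fun d hd => List.mem_takeWhile_imp hd) ha2]
        simp
      · -- a non-ws, non-word char comes first: A does not treat the word as a key
        obtain ⟨d, w2', hw2'⟩ : ∃ d w2', (a'.dropWhile pvIsW).dropWhile pvWS = d :: w2' := by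
          cases hcc : (a'.dropWhile pvIsW).dropWhile pvWS with
          | nil => exact absurd hcc hw2
          | cons d w2' => exact ⟨d, w2', rfl⟩
        have hd1 : d ∈ (a'.dropWhile pvIsW).dropWhile pvWS := by rw [hw2']; simp
        have hdmem : d ∈ a' :=
          (List.dropWhile_sublist _).subset ((List.dropWhile_sublist _).subset hd1)
        have hdcol : ¬ d = ':' := h d (by simp [hdmem])
        have ha2ne : a'.dropWhile pvIsW ≠ [] := by
          intro h0; rw [h0] at hw2'; simp at hw2'
        have ha2hd : ∀ e, (a'.dropWhile pvIsW).head? = some e → pvIsW e = false := by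
          intro e he; exact dw_head _ _ he
        have ha2ws : ¬ (a'.dropWhile pvIsW).all pvWS = true := by
          intro hall; rw [dw_id _ hall] at hw2'; simp at hw2'
        rw [hw2', List.cons_append, if_neg (by simp [hdcol])]
        rw [pvOut_piece a' u (fun e he => h e (by simp [he]))]
        have hQ1 : pvQuoteKey (c :: a')
            = (c :: a'.takeWhile pvIsW) ++ pvQuoteKey (a'.dropWhile pvIsW) := by
          conv_lhs => rw [← hsplit]
          exact quoteKey_skip (c :: a'.takeWhile pvIsW) _ ha2ne ha2hd ha2ws
        have hQ2 : pvQuoteKey a'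
            = a'.takeWhile pvIsW ++ pvQuoteKey (a'.dropWhile pvIsW) := by
          conv_lhs => rw [← hsplit]
          exact quoteKey_skip (a'.takeWhile pvIsW) _ ha2ne ha2hd ha2ws
        rw [hQ1, hQ2]
        simp
    · rw [if_neg hst]
      rw [pvOut_piece a' u (fun e he => h e (by simp [he]))]
      rw [quoteKey_cons_nonstart c a' (eq_false_of_ne_true hst)]
      simp
  termination_by a _ => a.length
  decreasing_by
    all_goals simp only [List.length_cons]
    all_goals exact Nat.lt_succ_self _

theorem pvOut_no_colon : ∀ (seg : List Char), (∀ c ∈ seg, ¬ c = ':') → pvOut seg = seg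
  | [] => by intro _; rw [pvOut]
  | c :: t => by
    intro h
    rw [pvOut]
    by_cases hst : pvIsStart c = true
    · have hk : ¬ ((t.dropWhile pvIsW).dropWhile pvWS).head? = some ':' := by
        intro hkk
        have hmem : ':' ∈ (t.dropWhile pvIsW).dropWhile pvWS := by
          cases hcc : (t.dropWhile pvIsW).dropWhile pvWS with
          | nil => rw [hcc] at hkk; simp at hkk
          | cons a b =>
            rw [hcc] at hkk; simp at hkk; subst hkk; simp [hcc]
        have : ':' ∈ t :=
          (List.dropWhile_sublist _).subset ((List.dropWhile_sublist _).subset hmem)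
        exact h ':' (by simp [this]) rfl
      rw [if_pos hst, if_neg hk]
      rw [pvOut_no_colon t (fun d hd => h d (by simp [hd]))]
    · rw [if_neg hst]
      rw [pvOut_no_colon t (fun d hd => h d (by simp [hd]))]
  termination_by seg => seg.length

theorem pvOut_eq_pvFix : ∀ seg : List Char, pvOut seg = pvFix seg
  | seg => by
    show pvOut seg = pvFix seg
    by_cases hc : ':' ∈ seg
    · have hrne : seg.dropWhile (· ≠ ':') ≠ [] := by
        intro h0
        have h1 := List.dropWhile_eq_nil_iff.1 h0 ':' hc
        simp at h1
      obtain ⟨q, u, hqu⟩ : ∃ q u, seg.dropWhile (· ≠ ':') = q :: u := by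
        cases hcc : seg.dropWhile (· ≠ ':') with
        | nil => exact absurd hcc hrne
        | cons q u => exact ⟨q, u, rfl⟩
      have hq : q = ':' := by
        have := dw_head (p := (· ≠ ':')) _ _ (by rw [hqu]; rfl)
        simpa using this
      subst hq
      have hseg : seg = seg.takeWhile (· ≠ ':') ++ ':' :: u := by
        conv_lhs => rw [← List.takeWhile_append_dropWhile (p := (· ≠ ':')) (l := seg)]
        rw [hqu]
      have hlen : u.length < seg.length := by
        conv_rhs => rw [hseg]
        simp
        omega
      have hnc : ∀ c ∈ seg.takeWhile (· ≠ ':'), ¬ c = ':' := by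
        intro d hd
        have := List.mem_takeWhile_imp hd
        simpa using this
      conv_lhs => rw [hseg]
      rw [pvOut_piece _ _ hnc, pvOut_eq_pvFix u]
      unfold pvFix
      have hsplitu : pvSplit (':' :: u) = [] :: pvSplit u := by
        rw [pvSplit]; simp
      conv_rhs => rw [hseg]
      rw [pvSplit_append _ _ hnc [] (pvSplit u) hsplitu, List.append_nil]
      rw [pvJoinFix_cons _ _ (pvSplit_ne_nil u)]
    · rw [pvOut_no_colon seg (fun d hd hdc => hc (hdc ▸ hd))]
      unfold pvFix
      rw [pvSplit_no_colon seg (fun d hd hdc => hc (hdc ▸ hd))]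
      rfl
  termination_by seg => seg.length

-- A's walk inside a string literal is B's literal lexer
theorem str_lemma : ∀ r : List Char, pvGoA r true false = (pvLit r).1 ++ pvGoA (pvLit r).2 false false
  | [] => by
    rw [pvGoA, pvLit_nil]
    show ([] : List Char) = [] ++ pvGoA [] false false
    rw [pvGoA]
    rfl
  | c :: rest => by
    by_cases hb : c = '\\'
    · subst hb
      cases rest with
      | nil =>
        rw [pvGoA, pvGoA]
        simp [pvLit_bs_nil, pvGoA]
      | cons d r =>
        rw [pvGoA]
        rw [if_neg (by simp), if_pos ⟨rfl, rfl⟩]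
        rw [pvGoA, if_pos rfl]
        rw [str_lemma r, pvLit_bs]
        simp
    · by_cases hq : c = '"'
      · subst hq
        rw [pvGoA]
        rw [if_neg (by simp), if_neg (by decide), if_pos (rfl : ('"' : Char) = '"')]
        simp [pvLit_q]
      · rw [pvGoA]
        rw [if_neg (by simp), if_neg (by simp [hb]), if_neg hq, if_pos rfl]
        rw [str_lemma rest, pvLit_other c rest hb hq]
        simp

-- A's walk across a quote-free region followed by nothing or an opening quote
theorem seg_lemma : ∀ (xs tail : List Char), (∀ c ∈ xs, ¬ c = '"') →
    (∀ c, tail.head? = some c → c = '"') →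
    pvGoA (xs ++ tail) false false = pvOut xs ++ pvGoA tail false false
  | [], tail => by
    intro _ _
    rw [List.nil_append, pvOut]
    simp
  | c :: xs', tail => by
    intro hq htl
    have hcq : ¬ c = '"' := hq c (by simp)
    have htlW : ∀ d, tail.head? = some d → pvIsW d = false := fun d hd => by
      rw [htl d hd]; decide
    have htlWS : ∀ d, tail.head? = some d → pvWS d = false := fun d hd => by
      rw [htl d hd]; decide
    have htw : (xs' ++ tail).takeWhile pvIsW = xs'.takeWhile pvIsW := tw_bd _ _ htlW
    have hdw : (xs' ++ tail).dropWhile pvIsW = xs'.dropWhile pvIsW ++ tail := dw_bd _ _ htlW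
    have hdw2 : ((xs'.dropWhile pvIsW) ++ tail).dropWhile pvWS
        = (xs'.dropWhile pvIsW).dropWhile pvWS ++ tail := dw_bd _ _ htlWS
    have hcond : (((xs'.dropWhile pvIsW).dropWhile pvWS ++ tail).head? = some ':')
        ↔ (((xs'.dropWhile pvIsW).dropWhile pvWS).head? = some ':') := by
      cases hcc : (xs'.dropWhile pvIsW).dropWhile pvWS with
      | nil =>
        simp only [hcc, List.nil_append]
        constructor
        · intro hh; have := htl ':' hh; simp at this
        · intro hh; simp at hh
      | cons a b => simp [hcc]
    rw [List.cons_append, pvGoA, pvOut]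
    rw [if_neg (by simp), if_neg (by simp), if_neg hcq]
    simp only [Bool.false_eq_true, if_false]
    by_cases hst : pvIsStart c = true
    · rw [if_pos hst, if_pos hst, htw, hdw, hdw2]
      by_cases hk : ((xs'.dropWhile pvIsW).dropWhile pvWS).head? = some ':'
      · rw [if_pos (hcond.2 hk), if_pos hk]
        rw [seg_lemma (xs'.dropWhile pvIsW) tail
            (fun e he => hq e (by simp [(List.dropWhile_sublist _).subset he])) htl]
        simp
      · rw [if_neg (fun hh => hk (hcond.1 hh)), if_neg hk]
        rw [seg_lemma xs' tail (fun e he => hq e (by simp [he])) htl]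
        simp
    · rw [if_neg hst, if_neg hst]
      rw [seg_lemma xs' tail (fun e he => hq e (by simp [he])) htl]
      simp
  termination_by xs _ => xs.length
  decreasing_by
    all_goals simp only [List.length_cons]
    all_goals first
      | exact Nat.lt_succ_self _
      | exact Nat.lt_succ_of_le (List.length_dropWhile_le _ _)

theorem pvLexB_unfold (cs : List Char) : pvLexB cs =
    if _hrest : cs.dropWhile (· ≠ '"') = [] then pvFix (cs.takeWhile (· ≠ '"'))
    else pvFix (cs.takeWhile (· ≠ '"'))
      ++ '"' :: (pvLit (cs.dropWhile (· ≠ '"')).tail).1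
      ++ pvLexB (pvLit (cs.dropWhile (· ≠ '"')).tail).2 := by
  rw [pvLexB.eq_def]

theorem main_lemma : ∀ cs : List Char, pvGoA cs false false = pvLexB cs
  | cs => by
    show pvGoA cs false false = pvLexB cs
    have hpre : ∀ c ∈ cs.takeWhile (· ≠ '"'), ¬ c = '"' := fun c hc => by
      simpa using List.mem_takeWhile_imp hc
    have hsplit : cs.takeWhile (· ≠ '"') ++ cs.dropWhile (· ≠ '"') = cs :=
      List.takeWhile_append_dropWhile
    by_cases hrest : cs.dropWhile (· ≠ '"') = []
    · have hlex : pvLexB cs = pvFix (cs.takeWhile (· ≠ '"')) := by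
        rw [pvLexB_unfold, dif_pos hrest]
      rw [hlex, ← pvOut_eq_pvFix]
      conv_lhs => rw [← hsplit, hrest]
      rw [seg_lemma _ [] hpre (by intro d hd; simp at hd)]
      rw [pvGoA]
      simp
    · obtain ⟨q, r, hqr⟩ : ∃ q r, cs.dropWhile (· ≠ '"') = q :: r := by
        cases hcc : cs.dropWhile (· ≠ '"') with
        | nil => exact absurd hcc hrest
        | cons q r => exact ⟨q, r, rfl⟩
      have hq : q = '"' := by
        have := dw_head (p := (· ≠ '"')) _ _ (by rw [hqr]; rfl)
        simpa using this
      subst hq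
      have hlex : pvLexB cs = pvFix (cs.takeWhile (· ≠ '"'))
          ++ '"' :: (pvLit r).1 ++ pvLexB (pvLit r).2 := by
        rw [pvLexB_unfold, dif_neg (by rw [hqr]; simp), hqr]
        simp only [List.tail_cons]
      conv_lhs => rw [← hsplit, hqr]
      rw [seg_lemma _ ('"' :: r) hpre (by intro d hd; simp at hd; exact hd.symm)]
      rw [pvGoA]
      rw [if_neg (by simp), if_neg (by decide), if_pos (rfl : ('"' : Char) = '"')]
      rw [show (!false) = true from rfl]
      rw [str_lemma r, main_lemma (pvLit r).2]
      rw [hlex, pvOut_eq_pvFix]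
      simp
  termination_by cs => cs.length
  decreasing_by
    have h1 := pvLit_snd_le r
    have h2 : (cs.dropWhile (· ≠ '"')).length ≤ cs.length := List.length_dropWhile_le _ _
    rw [hqr] at h2
    simp at h2
    simp only [cs] at h1 h2 ⊢
    omega
-- ===== VERDICT (by name: the statement is the Claim_ definition above) =====
theorem quote_js_keys_py_spec : Claim_equal_quote_js_keys_py := by
  intro s _
  show quote_js_keys_py s = quote_js_keys_py_alt s
  unfold quote_js_keys_py quote_js_keys_py_alt
  rw [main_lemma]
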